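-- pv_equiv track=rewrite | github.com/crypto-team228/projekt-krypto-2025 | scripts/anf_optimised_generator.py | compute_optimal_splits
-- ===== SOURCE A (Python) =====
-- def mask_bits(mask):
--     return [i for i in range(6) if (mask >> i) & 1]
--
-- def compute_optimal_splits(masks_closure):
--     """
--     DP po maskach:
--     cost[mask] = minimalna liczba AND‑ów, żeby zbudować maskę,
--     split[mask] = (A, B) takie, że mask = A ∪ B, A∩B=∅, koszt minimalny.
--     """
--     # sortujemy po liczbie bitów, potem po wartości
--     masks_sorted = sorted(masks_closure, key=lambda m: (bin(m).count("1"), m))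
--
--     cost = {}
--     split = {}
--
--     for m in masks_sorted:
--         bits = mask_bits(m)
--         if len(bits) <= 1:
--             cost[m] = 0
--             split[m] = None
--             continue
--
--         best_cost = None
--         best_split = None
--
--         # wszystkie właściwe, niepuste podmaski
--         sub = m
--         while sub:
--             sub = (sub - 1) & m
--             if not sub or sub == m:
--                 continue
--             other = m ^ sub
--             if other == 0:
--                 continue
--
--             # koszt = koszt(sub) + koszt(other) + 1 (AND)
--             c = cost.get(sub, 0) + cost.get(other, 0) + 1
--             if best_cost is None or c < best_cost:
--                 best_cost = c
--                 best_split = (sub, other)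
--
--         cost[m] = best_cost
--         split[m] = best_split
--
--     return cost, split
-- ===== SOURCE B (Python) =====
-- def compute_optimal_splits(masks_closure):
--     """
--     Top-down memoized recursion over masks instead of A's bottom-up
--     popcount-ordered DP sweep: f(m) is order-independent, so the cost/split
--     of each mask is computed on demand and cached.
--     """
--     closure = set(masks_closure)
--     memo = {}
--
--     def f(m):
--         if m in memo:
--             return memo[m]
--         bits = [i for i in range(6) if (m >> i) & 1]
--         if len(bits) <= 1:
--             res = (0, None)
--         else:
--             # proper nonempty submasks, in decreasing order
--             subs = []
--             s = (m - 1) & m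
--             while s:
--                 subs.append(s)
--                 s = (s - 1) & m
--
--             def cost_of(x):
--                 return f(x)[0] if x in closure else 0
--
--             c, _, s = min((cost_of(s) + cost_of(m ^ s) + 1, i, s)
--                           for i, s in enumerate(subs))
--             res = (c, (s, m ^ s))
--         memo[m] = res
--         return res
--
--     cost = {}
--     split = {}
--     for m in sorted(masks_closure, key=lambda m: (bin(m).count("1"), m)):
--         c, sp = f(m)
--         cost[m] = c
--         split[m] = sp
--     return cost, split
-- ===== Notes on version B (the rewrite author's own statement) =====
-- stated objective: alternative
-- what changed: A runs a bottom-up DP sweep over the masks sorted by popcount, threading a mutable cost dict through an interleaved best-tracking while-loop; B replaces this with a pure top-down memoized recursion f(m) over masks (order-independent, looking submask costs up in the closure set), collecting the submask candidates first and taking the first tuple-minimum.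
import Mathlib
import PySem

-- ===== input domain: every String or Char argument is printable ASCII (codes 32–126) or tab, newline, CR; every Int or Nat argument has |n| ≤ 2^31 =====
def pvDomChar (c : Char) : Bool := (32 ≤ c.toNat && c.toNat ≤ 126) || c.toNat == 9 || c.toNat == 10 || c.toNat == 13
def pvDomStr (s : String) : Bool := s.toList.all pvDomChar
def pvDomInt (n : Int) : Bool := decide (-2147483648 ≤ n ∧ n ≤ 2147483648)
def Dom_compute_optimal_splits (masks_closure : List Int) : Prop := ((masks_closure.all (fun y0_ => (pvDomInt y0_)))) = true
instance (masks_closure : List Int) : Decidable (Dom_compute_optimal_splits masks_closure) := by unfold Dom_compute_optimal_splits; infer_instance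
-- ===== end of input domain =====

-- B re-implements A's bottom-up popcount-sorted DP as a top-down recursion over masks
-- (objective: alternative decomposition, same asymptotic cost); equal return value proved on Pre_.

-- ===== PORT A =====

-- mask_bits(mask) = [i for i in range(6) if (mask >> i) & 1]
def pvMaskBits (mask : Int) : List Int :=
  (PySem.List.pyRange 0 6).filter (fun i => PySem.Int.band (mask >>> i.toNat) 1 != 0)

-- the inner `while sub:` loop of A; best_cost/best_split are always assigned together,
-- so they are carried as one Option; fuel only makes the loop total (never exhausted on Pre_)
def pvALoop (cost : PySem.Dict Int Int) (m : Int) :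
    Nat → Int → Option (Int × (Int × Int)) → Option (Int × (Int × Int))
  | 0, _, best => best
  | fuel+1, sub, best =>
    if sub == 0 then best
    else
      let sub' := PySem.Int.band (sub - 1) m
      if sub' == 0 || sub' == m then pvALoop cost m fuel sub' best
      else
        let other := PySem.Int.bxor m sub'
        if other == 0 then pvALoop cost m fuel sub' best
        else
          let c := cost.getD sub' 0 + cost.getD other 0 + 1
          match best with
          | none => pvALoop cost m fuel sub' (some (c, (sub', other)))
          | some b => pvALoop cost m fuel sub' (if c < b.1 then some (c, (sub', other)) else some b)

-- bin(m).count("1") is PySem.Int.bitCount (popcount of |m|, Python-exact)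
def compute_optimal_splits (masks_closure : List Int) :
    (List (Int × Int)) × (List (Int × Option (Int × Int))) :=
  let masks_sorted := PySem.List.sorted2 masks_closure
      (fun m => (PySem.Int.bitCount m : Int)) (fun m => m)
  let st := masks_sorted.foldl
    (fun (st : PySem.Dict Int Int × PySem.Dict Int (Option (Int × Int))) m =>
      let bits := pvMaskBits m
      if bits.length ≤ 1 then (st.1.insert m 0, st.2.insert m none)
      else
        match pvALoop st.1 m (m.toNat + 2) m none with
        | some b => (st.1.insert m b.1, st.2.insert m (some b.2))
        | none => (st.1.insert m 0, st.2.insert m none))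
        -- `none` is unreachable: a mask with ≥ 2 bits always yields a candidate split
    (PySem.Dict.empty, PySem.Dict.empty)
  (st.1.items, st.2.items)

-- ===== PORT B =====

-- Source B: the `subs` list collected by the `while s:` loop (decreasing proper submasks);
-- `subs.append(s)` is ported as an accumulator (prepend, reversed on exit)
def pvSubsB (m : Int) : Nat → Int → List Int → List Int
  | 0, _, acc => acc.reverse
  | fuel+1, s, acc =>
    if s == 0 then acc.reverse else pvSubsB m fuel (PySem.Int.band (s - 1) m) (s :: acc)

-- Source B: bits = [i for i in range(6) if (m >> i) & 1]  (hoisted to a named helper)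
def pvMaskBitsB (m : Int) : List Int :=
  (PySem.List.pyRange 0 6).filter (fun i => PySem.Int.band (m >>> i.toNat) 1 != 0)

-- Source B's memoized f(m); the memo cache is dropped in the port (pure recursion, fuel
-- bounded by the popcount, which strictly decreases at each recursive call)
def pvFB (closure : PySem.Set Int) : Nat → Int → Int × Option (Int × Int)
  | 0, _ => (0, none)
  | fuel+1, m =>
    let bits := pvMaskBitsB m
    if bits.length ≤ 1 then (0, none)
    else
      let subs := pvSubsB m (m.toNat + 1) (PySem.Int.band (m - 1) m) []
      let costOf := fun x => if x ∈ closure then (pvFB closure fuel x).1 else 0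
      -- min((cost_of(s) + cost_of(m ^ s) + 1, i, s) for i, s in enumerate(subs)):
      -- the index i makes the tuple-min keep the FIRST minimal candidate, i.e. a
      -- left fold keeping the first strict minimum of the cost component
      let cands := subs.map (fun s => (costOf s + costOf (PySem.Int.bxor m s) + 1, s))
      match cands with
      | [] => (0, none)  -- unreachable: a mask with ≥ 2 bits has a proper nonempty submask
      | c0 :: rest =>
        let b := rest.foldl (fun b p => if p.1 < b.1 then p else b) c0
        (b.1, some (b.2, PySem.Int.bxor m b.2))

def compute_optimal_splits_alt (masks_closure : List Int) :
    (List (Int × Int)) × (List (Int × Option (Int × Int))) :=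
  let closure := PySem.Set.ofList masks_closure
  let st := (PySem.List.sorted2 masks_closure
      (fun m => (PySem.Int.bitCount m : Int)) (fun m => m)).foldl
    (fun (st : PySem.Dict Int Int × PySem.Dict Int (Option (Int × Int))) m =>
      let r := pvFB closure (PySem.Int.bitCount m + 1) m
      (st.1.insert m r.1, st.2.insert m r.2))
    (PySem.Dict.empty, PySem.Dict.empty)
  (st.1.items, st.2.items)

-- ===== PRECONDITION & SPEC =====

-- Pre_ excludes exactly the inputs on which A never returns: a negative mask with at
-- least two of its six low bits set makes A's `while sub:` loop run forever (sub stays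
-- negative); on every other input A returns normally.
def Pre_compute_optimal_splits (masks_closure : List Int) : Prop :=
  ∀ m ∈ masks_closure, 0 ≤ m ∨ PySem.Int.bitCount (PySem.Int.mod m 64) ≤ 1

instance (masks_closure : List Int) : Decidable (Pre_compute_optimal_splits masks_closure) := by
  unfold Pre_compute_optimal_splits; infer_instance

def pvWitness_compute_optimal_splits : List Int := [3, 1, 2, 7, 3]

def Spec_compute_optimal_splits (masks_closure : List Int)
    (out : (List (Int × Int)) × (List (Int × Option (Int × Int)))) : Prop :=
  out = compute_optimal_splits_alt masks_closure

instance (masks_closure : List Int) (out : (List (Int × Int)) × (List (Int × Option (Int × Int)))) :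
    Decidable (Spec_compute_optimal_splits masks_closure out) := by
  unfold Spec_compute_optimal_splits; infer_instance

-- ===== CLAIM (what is proved, stated in full; the proofs are below) =====
def Claim_equal_compute_optimal_splits : Prop :=
  ∀ (masks_closure : List Int), Dom_compute_optimal_splits masks_closure →
    Pre_compute_optimal_splits masks_closure →
    Spec_compute_optimal_splits masks_closure (compute_optimal_splits masks_closure)

-- ===== LEMMAS AND PROOFS =====

-- proof-side view of B's submask loop, without the accumulator
def pvChain (m : Int) : Nat → Int → List Int
  | 0, _ => []
  | fuel+1, s => if s == 0 then [] else s :: pvChain m fuel (PySem.Int.band (s - 1) m)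

theorem pvSubsB_eq_chain (m : Int) :
    ∀ (fuel : Nat) (s : Int) (acc : List Int),
      pvSubsB m fuel s acc = acc.reverse ++ pvChain m fuel s := by
  intro fuel
  induction fuel with
  | zero => intro s acc; simp [pvSubsB, pvChain]
  | succ fuel ih =>
    intro s acc
    rw [pvSubsB, pvChain]
    by_cases hz : s == 0
    · rw [if_pos hz, if_pos hz]; simp
    · rw [if_neg hz, if_neg hz, ih]
      simp

-- ---- Nat-level popcount / bitmask facts ----

def pvBC (n : Nat) : Nat := PySem.Int.bitCount (n : Int)

theorem pvBC_zero : pvBC 0 = 0 := by decide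

theorem pvBC_step {n : Nat} (h : 0 < n) : pvBC n = n % 2 + pvBC (n / 2) :=
  PySem.Int.bitCount_natCast h

theorem pvBC_pos {n : Nat} (h : n ≠ 0) : 1 ≤ pvBC n := by
  induction n using Nat.strong_induction_on with
  | _ n ih =>
    rw [pvBC_step (Nat.pos_of_ne_zero h)]
    by_cases h2 : n / 2 = 0
    · have : n % 2 = 1 := by omega
      omega
    · have := ih (n / 2) (by omega) h2
      omega

theorem pv_land_mod2 (a b : Nat) : (a &&& b) % 2 = a % 2 * (b % 2) := by
  have h := Nat.testBit_land a b 0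
  simp only [Nat.testBit, Nat.shiftRight_zero] at h
  rcases Nat.mod_two_eq_zero_or_one a with ha | ha <;>
  rcases Nat.mod_two_eq_zero_or_one b with hb | hb <;>
  rcases Nat.mod_two_eq_zero_or_one (a &&& b) with hc | hc <;>
  simp_all

theorem pv_sub_halves {a b : Nat} (h : a &&& b = a) :
    a / 2 &&& b / 2 = a / 2 ∧ a % 2 ≤ b % 2 := by
  refine ⟨by rw [← Nat.and_div_two, h], ?_⟩
  have h2 : a % 2 * (b % 2) = a % 2 := by rw [← pv_land_mod2, h]
  rcases Nat.mod_two_eq_zero_or_one a with h4 | h4 <;>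
  rcases Nat.mod_two_eq_zero_or_one b with h5 | h5 <;> rw [h4, h5] at h2 <;> omega

theorem pvBC_sub_lt {a b : Nat} (h : a &&& b = a) (hne : a ≠ b) : pvBC a < pvBC b := by
  induction b using Nat.strong_induction_on generalizing a with
  | _ b ih =>
    rcases Nat.eq_zero_or_pos b with hb | hb
    · subst hb; simp at h; omega
    obtain ⟨h1, h2⟩ := pv_sub_halves h
    rcases Nat.eq_zero_or_pos a with ha | ha
    · subst ha
      rw [pvBC_step hb, pvBC_zero]
      by_cases hb2 : b / 2 = 0
      · have : b % 2 = 1 := by omega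
        omega
      · have := pvBC_pos hb2
        omega
    rw [pvBC_step ha, pvBC_step hb]
    by_cases hd : a / 2 = b / 2
    · have hm : a % 2 ≠ b % 2 := by
        intro hmm; apply hne; omega
      rw [hd]; omega
    · have := ih (b / 2) (by omega) h1 hd
      omega

theorem pvBC_sub_le {a b : Nat} (h : a &&& b = a) : pvBC a ≤ pvBC b := by
  by_cases hne : a = b
  · subst hne; exact le_refl _
  · exact le_of_lt (pvBC_sub_lt h hne)

theorem pv_land_pred_ne_zero {a : Nat} (h : 2 ≤ pvBC a) : a &&& (a - 1) ≠ 0 := by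
  induction a using Nat.strong_induction_on with
  | _ a ih =>
    intro hz
    rcases Nat.eq_zero_or_pos a with ha | ha
    · subst ha; rw [pvBC_zero] at h; omega
    rcases Nat.mod_two_eq_zero_or_one a with he | he
    · have hd : (a - 1) / 2 = a / 2 - 1 := by omega
      have hh : (a &&& (a - 1)) / 2 = a / 2 &&& (a / 2 - 1) := by
        rw [Nat.and_div_two, hd]
      rw [hz] at hh
      have hbc : 2 ≤ pvBC (a / 2) := by
        rw [pvBC_step ha] at h; omega
      exact ih (a / 2) (by omega) hbc (by omega)
    · have hd : (a - 1) / 2 = a / 2 := by omega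
      have hm : (a - 1) % 2 = 0 := by omega
      have hmod : (a &&& (a - 1)) % 2 = 0 := by rw [pv_land_mod2, hm, Nat.mul_zero]
      have hdiv : (a &&& (a - 1)) / 2 = a / 2 := by
        rw [Nat.and_div_two, hd, Nat.and_self]
      have hbc : 1 ≤ pvBC (a / 2) := by
        rw [pvBC_step ha] at h; omega
      have : a / 2 ≠ 0 := by
        intro hzz; rw [hzz, pvBC_zero] at hbc; omega
      omega

theorem pv_xor_submask {a b : Nat} (h : a &&& b = a) : (b ^^^ a) &&& b = b ^^^ a := by
  apply Nat.eq_of_testBit_eq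
  intro i
  have ha := congrArg (fun x => x.testBit i) h
  simp only [Nat.testBit_land, Nat.testBit_xor] at *
  cases hta : a.testBit i <;> cases htb : b.testBit i <;> simp_all

theorem pv_land_submask (a b : Nat) : (a &&& b) &&& b = a &&& b := by
  apply Nat.eq_of_testBit_eq
  intro i
  simp only [Nat.testBit_land]
  cases a.testBit i <;> cases b.testBit i <;> simp

-- ---- Int-level wrappers (all masks in play are nonnegative) ----

theorem pv_band_le {a m : Int} (ha : 0 ≤ a) (hm : 0 ≤ m) : PySem.Int.band a m ≤ a := by
  obtain ⟨a', rfl⟩ := Int.eq_ofNat_of_zero_le ha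
  obtain ⟨m', rfl⟩ := Int.eq_ofNat_of_zero_le hm
  rw [PySem.Int.band_natCast]
  exact_mod_cast Nat.and_le_left

theorem pv_band_idem {a m : Int} (ha : 0 ≤ a) (hm : 0 ≤ m) :
    PySem.Int.band (PySem.Int.band a m) m = PySem.Int.band a m := by
  obtain ⟨a', rfl⟩ := Int.eq_ofNat_of_zero_le ha
  obtain ⟨m', rfl⟩ := Int.eq_ofNat_of_zero_le hm
  rw [PySem.Int.band_natCast, PySem.Int.band_natCast]
  exact_mod_cast congrArg (Nat.cast : Nat → Int) (pv_land_submask a' m')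

theorem pvPC_sub_lt {x m : Int} (hx : 0 ≤ x) (hm : 0 ≤ m)
    (hsub : PySem.Int.band x m = x) (hne : x ≠ m) :
    PySem.Int.bitCount x < PySem.Int.bitCount m := by
  obtain ⟨a', rfl⟩ := Int.eq_ofNat_of_zero_le hx
  obtain ⟨m', rfl⟩ := Int.eq_ofNat_of_zero_le hm
  rw [PySem.Int.band_natCast] at hsub
  have h : a' &&& m' = a' := by exact_mod_cast hsub
  have hne' : a' ≠ m' := by exact_mod_cast fun hh => hne (by exact_mod_cast congrArg (Nat.cast : Nat → Int) hh)
  exact pvBC_sub_lt h hne'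

theorem pv_bxor_facts {x m : Int} (hx : 0 ≤ x) (hm : 0 ≤ m)
    (hsub : PySem.Int.band x m = x) :
    0 ≤ PySem.Int.bxor m x ∧ PySem.Int.band (PySem.Int.bxor m x) m = PySem.Int.bxor m x ∧
    (PySem.Int.bxor m x = 0 ↔ x = m) := by
  obtain ⟨a', rfl⟩ := Int.eq_ofNat_of_zero_le hx
  obtain ⟨m', rfl⟩ := Int.eq_ofNat_of_zero_le hm
  rw [PySem.Int.band_natCast] at hsub
  have h : a' &&& m' = a' := by exact_mod_cast hsub
  rw [PySem.Int.bxor_natCast, PySem.Int.band_natCast]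
  refine ⟨by positivity, ?_, ?_⟩
  · exact_mod_cast congrArg (Nat.cast : Nat → Int) (pv_xor_submask h)
  · constructor
    · intro hz
      have : m' ^^^ a' = 0 := by exact_mod_cast hz
      have := Nat.xor_eq_zero_iff.mp this
      exact_mod_cast congrArg (Nat.cast : Nat → Int) this.symm
    · intro hz
      have : a' = m' := by exact_mod_cast hz
      subst this
      simp


-- ---- sorting-order machinery ----

def pvKeyle (a b : Int) : Prop :=
  PySem.Int.bitCount a < PySem.Int.bitCount b ∨
  (PySem.Int.bitCount a = PySem.Int.bitCount b ∧ a ≤ b)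

def pvLt (a b : Int) : Bool :=
  decide ((PySem.Int.bitCount a : Int) < (PySem.Int.bitCount b : Int)) ||
  (!decide ((PySem.Int.bitCount b : Int) < (PySem.Int.bitCount a : Int)) && decide (a < b))

theorem pvLt_true {a b : Int} (h : pvLt a b = true) : pvKeyle a b := by
  unfold pvLt at h; unfold pvKeyle
  simp at h
  rcases h with h | ⟨h1, h2⟩
  · left; exact_mod_cast h
  · omega

theorem pvLt_false {a b : Int} (h : pvLt a b = false) : pvKeyle b a := by
  unfold pvLt at h; unfold pvKeyle
  simp at h
  obtain ⟨h1, h2⟩ := h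
  by_cases hc : PySem.Int.bitCount b < PySem.Int.bitCount a
  · left; exact hc
  · have h3 := h2 (by omega)
    omega

theorem pvKeyle_trans {a b c : Int} (h1 : pvKeyle a b) (h2 : pvKeyle b c) : pvKeyle a c := by
  unfold pvKeyle at *; omega

theorem pv_pairwise_insertBy {x : Int} {ys : List Int} (h : ys.Pairwise pvKeyle) :
    (PySem.List.insertBy pvLt x ys).Pairwise pvKeyle := by
  induction ys with
  | nil => simp [PySem.List.insertBy]
  | cons y ys ih =>
    rw [PySem.List.insertBy]
    rcases List.pairwise_cons.mp h with ⟨hy, hys⟩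
    by_cases hb : pvLt x y = true
    · rw [if_pos hb]
      refine List.pairwise_cons.mpr ⟨?_, h⟩
      intro z hz
      rcases List.mem_cons.mp hz with rfl | hz2
      · exact pvLt_true hb
      · exact pvKeyle_trans (pvLt_true hb) (hy z hz2)
    · rw [if_neg hb]
      refine List.pairwise_cons.mpr ⟨?_, ih hys⟩
      intro z hz
      rcases (PySem.List.mem_insertBy pvLt x z ys).mp hz with rfl | hz2
      · exact pvLt_false (by simpa using hb)
      · exact hy z hz2

theorem pv_pairwise_foldl (xs : List Int) :
    ∀ acc : List Int, acc.Pairwise pvKeyle →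
      (List.foldl (fun acc x => PySem.List.insertBy pvLt x acc) acc xs).Pairwise pvKeyle := by
  induction xs with
  | nil => intro acc h; exact h
  | cons x xs ih =>
    intro acc h
    exact ih _ (pv_pairwise_insertBy h)

theorem pv_sorted2_pairwise (xs : List Int) :
    (PySem.List.sorted2 xs (fun m => (PySem.Int.bitCount m : Int)) (fun m => m) false).Pairwise pvKeyle := by
  have h : PySem.List.sorted2 xs (fun m => (PySem.Int.bitCount m : Int)) (fun m => m) false
      = List.foldl (fun acc x => PySem.List.insertBy pvLt x acc) [] xs := rfl
  rw [h]
  exact pv_pairwise_foldl xs [] (by simp)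

theorem pv_mem_prefix {order done rest : List Int} {m x : Int}
    (hp : order.Pairwise pvKeyle) (ho : order = done ++ m :: rest)
    (hx : x ∈ order) (hlt : PySem.Int.bitCount x < PySem.Int.bitCount m) : x ∈ done := by
  subst ho
  rcases List.mem_append.mp hx with h | h
  · exact h
  · exfalso
    rcases List.mem_cons.mp h with rfl | h2
    · omega
    · have hmem := List.pairwise_cons.mp (List.pairwise_append.mp hp).2.1
      have := hmem.1 x h2
      unfold pvKeyle at this; omega

-- ---- the submask chain ----

theorem pv_subs_mem {m : Int} (hm : 0 < m) :
    ∀ (fuel : Nat) (s : Int), 0 ≤ s → PySem.Int.band s m = s → s < m →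
      ∀ x ∈ pvChain m fuel s, 0 ≤ x ∧ x ≠ 0 ∧ PySem.Int.band x m = x ∧ x < m := by
  intro fuel
  induction fuel with
  | zero => intro s _ _ _ x hx; simp [pvChain] at hx
  | succ fuel ih =>
    intro s hs0 hsub hslt x hx
    rw [pvChain] at hx
    by_cases hz : s = 0
    · simp [hz] at hx
    · rw [if_neg (by simpa using hz)] at hx
      rcases List.mem_cons.mp hx with rfl | hx2
      · exact ⟨hs0, hz, hsub, hslt⟩
      · have h1 : (0:Int) ≤ s - 1 := by omega
        have h2 : 0 ≤ PySem.Int.band (s - 1) m := PySem.Int.band_nonneg_of_nonneg_left m h1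
        have h3 : PySem.Int.band (PySem.Int.band (s - 1) m) m = PySem.Int.band (s - 1) m :=
          pv_band_idem h1 (le_of_lt hm)
        have h4 : PySem.Int.band (s - 1) m ≤ s - 1 := pv_band_le h1 (le_of_lt hm)
        exact ih _ h2 h3 (by omega) x hx2

theorem pv_subs_fuel {m : Int} (hm : 0 ≤ m) :
    ∀ (n : Nat) (s : Int) (f1 f2 : Nat), s.toNat = n → 0 ≤ s → s.toNat < f1 → s.toNat < f2 →
      pvChain m f1 s = pvChain m f2 s := by
  intro n
  induction n using Nat.strong_induction_on with
  | _ n ih =>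
    intro s f1 f2 hn hs0 hf1 hf2
    match f1, f2 with
    | f1 + 1, f2 + 1 =>
      rw [pvChain, pvChain]
      by_cases hz : s = 0
      · simp [hz]
      · rw [if_neg (by simpa using hz), if_neg (by simpa using hz)]
        have h1 : (0:Int) ≤ s - 1 := by omega
        have h2 : 0 ≤ PySem.Int.band (s - 1) m := PySem.Int.band_nonneg_of_nonneg_left m h1
        have h4 : PySem.Int.band (s - 1) m ≤ s - 1 := pv_band_le h1 hm
        have hlt : (PySem.Int.band (s - 1) m).toNat < n := by omega
        rw [ih _ hlt _ f1 f2 rfl h2 (by omega) (by omega)]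

-- ---- A's interleaved loop as a fold over the submask chain ----

def pvAU (cost : PySem.Dict Int Int) (m : Int)
    (best : Option (Int × (Int × Int))) (x : Int) : Option (Int × (Int × Int)) :=
  let other := PySem.Int.bxor m x
  let c := cost.getD x 0 + cost.getD other 0 + 1
  match best with
  | none => some (c, (x, other))
  | some b => if c < b.1 then some (c, (x, other)) else some b

theorem pvALoop_zero (cost : PySem.Dict Int Int) (m : Int) (best : Option (Int × (Int × Int))) :
    ∀ fuel, pvALoop cost m fuel 0 best = best := by
  intro fuel
  match fuel with
  | 0 => rfl
  | fuel + 1 => rw [pvALoop]; simp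

theorem pv_aloop_fold (cost : PySem.Dict Int Int) {m : Int} (hm : 0 < m) :
    ∀ (fuel : Nat) (s : Int) (best : Option (Int × (Int × Int))),
      0 < s → s ≤ m → PySem.Int.band s m = s →
      pvALoop cost m (fuel+1) s best =
        List.foldl (pvAU cost m) best (pvChain m (fuel+1) (PySem.Int.band (s-1) m)) := by
  intro fuel
  induction fuel with
  | zero =>
    intro s best hs0 hsm hsub
    rw [pvALoop]
    rw [if_neg (by simp; omega)]
    have h1 : (0:Int) ≤ s - 1 := by omega
    have h2 : 0 ≤ PySem.Int.band (s - 1) m := PySem.Int.band_nonneg_of_nonneg_left m h1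
    have h4 : PySem.Int.band (s - 1) m ≤ s - 1 := pv_band_le h1 (le_of_lt hm)
    by_cases hz : PySem.Int.band (s - 1) m = 0
    · rw [hz]
      rw [if_pos (by simp)]
      rw [pvALoop_zero]
      rfl
    · have hssub : PySem.Int.band (PySem.Int.band (s - 1) m) m = PySem.Int.band (s - 1) m :=
        pv_band_idem h1 (le_of_lt hm)
      have hne_m : PySem.Int.band (s - 1) m ≠ m := by omega
      rw [if_neg (by simp; exact ⟨hz, hne_m⟩)]
      have hx := pv_bxor_facts h2 (le_of_lt hm) hssub
      rw [if_neg (by simp; intro hh; exact hne_m (hx.2.2.mp hh))]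
      rw [pvChain, if_neg (by simpa using hz)]
      cases best <;> rfl
  | succ fuel ih =>
    intro s best hs0 hsm hsub
    rw [pvALoop]
    rw [if_neg (by simp; omega)]
    have h1 : (0:Int) ≤ s - 1 := by omega
    have h2 : 0 ≤ PySem.Int.band (s - 1) m := PySem.Int.band_nonneg_of_nonneg_left m h1
    have h4 : PySem.Int.band (s - 1) m ≤ s - 1 := pv_band_le h1 (le_of_lt hm)
    by_cases hz : PySem.Int.band (s - 1) m = 0
    · rw [hz]
      rw [if_pos (by simp)]
      rw [pvALoop_zero]
      rw [pvChain, if_pos (by simp)]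
      rfl
    · have hssub : PySem.Int.band (PySem.Int.band (s - 1) m) m = PySem.Int.band (s - 1) m :=
        pv_band_idem h1 (le_of_lt hm)
      have hne_m : PySem.Int.band (s - 1) m ≠ m := by omega
      rw [if_neg (by simp; exact ⟨hz, hne_m⟩)]
      have hx := pv_bxor_facts h2 (le_of_lt hm) hssub
      rw [if_neg (by simp; intro hh; exact hne_m (hx.2.2.mp hh))]
      rw [pvChain, if_neg (by simpa using hz)]
      cases best with
      | none => exact ih (PySem.Int.band (s - 1) m) (pvAU cost m none (PySem.Int.band (s - 1) m)) (by omega) (by omega) hssub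
      | some b => exact ih (PySem.Int.band (s - 1) m) (pvAU cost m (some b) (PySem.Int.band (s - 1) m)) (by omega) (by omega) hssub

-- ---- mask_bits length = popcount of the six low bits ----
theorem pv_maskbits_len (m : Int) :
    (pvMaskBits m).length = PySem.Int.bitCount (PySem.Int.mod m 64) := by
  have hmod : PySem.Int.mod m 64 = m % 64 := PySem.Int.mod_eq_emod_of_pos (by norm_num)
  have hr0 : 0 ≤ m % 64 := Int.emod_nonneg m (by norm_num)
  have hr64 : m % 64 < 64 := Int.emod_lt_of_pos m (by norm_num)
  have hm : m = 64 * (m / 64) + m % 64 := by omega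
  have key : ∀ (c d : Int), 0 < c → c * d = 64 → (2:Int) ∣ d →
      PySem.Int.mod (m / c) 2 = PySem.Int.mod ((m % 64) / c) 2 := by
    intro c d hc hcd hdvd
    obtain ⟨e, he⟩ := hdvd
    have hq : m / c = m % 64 / c + d * (m / 64) := by
      conv_lhs => rw [hm]
      rw [show (64:Int) * (m / 64) + m % 64 = m % 64 + c * (d * (m / 64)) by rw [← hcd]; ring]
      rw [Int.add_mul_ediv_left _ _ (ne_of_gt hc)]
    rw [hq, PySem.Int.mod_eq_emod_of_pos (by norm_num), PySem.Int.mod_eq_emod_of_pos (by norm_num), he]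
    rw [show m % 64 / c + 2 * e * (m / 64) = m % 64 / c + (e * (m / 64)) * 2 by ring]
    exact Int.add_mul_emod_self_right _ _ _
  have tb : ∀ (k : Nat) (c d : Int), 0 < c → c * d = 64 → (2:Int) ∣ d → ((2:Int)^k = c) →
      PySem.Int.band (m >>> k) 1 = PySem.Int.band ((m % 64) >>> k) 1 := by
    intro k c d hc hcd hdvd hpow
    rw [PySem.Int.band_one, PySem.Int.band_one, Int.shiftRight_eq_div_pow, Int.shiftRight_eq_div_pow]
    have hcast : ((2^k : Nat) : Int) = c := by push_cast; exact hpow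
    rw [hcast]
    exact key c d hc hcd hdvd
  have hsame : pvMaskBits m = pvMaskBits (m % 64) := by
    unfold pvMaskBits
    apply List.filter_congr
    intro i hi
    have hi6 : i = 0 ∨ i = 1 ∨ i = 2 ∨ i = 3 ∨ i = 4 ∨ i = 5 := by
      have hr : PySem.List.pyRange 0 6 = [0, 1, 2, 3, 4, 5] := by decide
      rw [hr] at hi; simp at hi; tauto
    rcases hi6 with rfl | rfl | rfl | rfl | rfl | rfl
    · rw [show ((0:Int).toNat) = 0 from rfl, tb 0 1 64 (by norm_num) (by norm_num) (by norm_num) (by norm_num)]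
    · rw [show ((1:Int).toNat) = 1 from rfl, tb 1 2 32 (by norm_num) (by norm_num) (by norm_num) (by norm_num)]
    · rw [show ((2:Int).toNat) = 2 from rfl, tb 2 4 16 (by norm_num) (by norm_num) (by norm_num) (by norm_num)]
    · rw [show ((3:Int).toNat) = 3 from rfl, tb 3 8 8 (by norm_num) (by norm_num) (by norm_num) (by norm_num)]
    · rw [show ((4:Int).toNat) = 4 from rfl, tb 4 16 4 (by norm_num) (by norm_num) (by norm_num) (by norm_num)]
    · rw [show ((5:Int).toNat) = 5 from rfl, tb 5 32 2 (by norm_num) (by norm_num) (by norm_num) (by norm_num)]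
  rw [hsame, hmod]
  generalize hgen : m % 64 = r at hr0 hr64
  clear hsame hmod hm key tb hgen
  interval_cases r <;> decide

-- ---- more Int bit facts ----

theorem pv_bxor_eq_self {x m : Int} (hx : 0 ≤ x) (hm : 0 ≤ m) :
    (PySem.Int.bxor m x = m ↔ x = 0) := by
  obtain ⟨a', rfl⟩ := Int.eq_ofNat_of_zero_le hx
  obtain ⟨m', rfl⟩ := Int.eq_ofNat_of_zero_le hm
  rw [PySem.Int.bxor_natCast]
  constructor
  · intro h
    have h2 : m' ^^^ a' = m' := by exact_mod_cast h
    have h3 := congrArg (fun y => m' ^^^ y) h2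
    simp only [Nat.xor_xor_cancel_left, Nat.xor_self] at h3
    exact_mod_cast h3
  · intro h
    have : a' = 0 := by exact_mod_cast h
    subst this; simp

theorem pv_land_submask' (a b : Nat) : (a &&& b) &&& a = a &&& b := by
  apply Nat.eq_of_testBit_eq
  intro i
  simp only [Nat.testBit_land]
  cases a.testBit i <;> cases b.testBit i <;> simp

-- a mask whose six low bits contain ≥ 2 ones is positive and has popcount ≥ 2
theorem pv_mask_pos {m : Int} (hm : 0 ≤ m) (hb : 2 ≤ (pvMaskBits m).length) :
    0 < m ∧ 2 ≤ PySem.Int.bitCount m := by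
  rw [pv_maskbits_len] at hb
  have hmod : PySem.Int.mod m 64 = m % 64 := PySem.Int.mod_eq_emod_of_pos (by norm_num)
  rw [hmod] at hb
  obtain ⟨n, rfl⟩ := Int.eq_ofNat_of_zero_le hm
  have hcast : ((n : Int)) % 64 = ((n % 64 : Nat) : Int) := by push_cast; ring_nf
  rw [hcast] at hb
  have h63 : n % 64 = n &&& 63 := by
    have := Nat.and_two_pow_sub_one_eq_mod n 6
    norm_num at this
    omega
  rw [h63] at hb
  have hsub : (n &&& 63) &&& n = n &&& 63 := pv_land_submask' n 63
  have hle : pvBC (n &&& 63) ≤ pvBC n := pvBC_sub_le hsub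
  unfold pvBC at hle
  constructor
  · rcases Nat.eq_zero_or_pos n with rfl | hp
    · exfalso
      simp at hb
    · exact_mod_cast hp
  · omega

-- ---- first-minimum fold ----

theorem pv_fold_min (cost : PySem.Dict Int Int) (m : Int) (c : Int → Int) :
    ∀ (xs : List Int) (p : Int × Int),
      (∀ x ∈ xs, cost.getD x 0 + cost.getD (PySem.Int.bxor m x) 0 + 1 = c x) →
      List.foldl (pvAU cost m) (some (p.1, (p.2, PySem.Int.bxor m p.2))) xs =
        some ((List.foldl (fun b pp => if pp.1 < b.1 then pp else b) p (xs.map (fun x => (c x, x)))).1,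
              ((List.foldl (fun b pp => if pp.1 < b.1 then pp else b) p (xs.map (fun x => (c x, x)))).2,
               PySem.Int.bxor m (List.foldl (fun b pp => if pp.1 < b.1 then pp else b) p (xs.map (fun x => (c x, x)))).2)) := by
  intro xs
  induction xs with
  | nil => intro p _; rfl
  | cons x xs ih =>
    intro p h
    have hc := h x (by simp)
    have hstep : pvAU cost m (some (p.1, (p.2, PySem.Int.bxor m p.2))) x
        = some ((if (c x, x).1 < p.1 then (c x, x) else p).1,
                ((if (c x, x).1 < p.1 then (c x, x) else p).2,
                 PySem.Int.bxor m (if (c x, x).1 < p.1 then (c x, x) else p).2)) := by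
      unfold pvAU
      simp only []
      rw [hc]
      by_cases hcx : c x < p.1
      · rw [if_pos hcx, if_pos (show (c x, x).1 < p.1 from hcx)]
      · rw [if_neg hcx, if_neg (show ¬ (c x, x).1 < p.1 from hcx)]
    simp only [List.foldl, List.map]
    rw [hstep]
    exact ih _ (fun y hy => h y (List.mem_cons_of_mem x hy))

-- ---- fuel-independence of B's f ----

theorem pvFB_fuel (closure : PySem.Set Int) :
    ∀ (fuel : Nat) (m : Int), (0 ≤ m ∨ (pvMaskBits m).length ≤ 1) →
      PySem.Int.bitCount m < fuel →
      pvFB closure fuel m = pvFB closure (PySem.Int.bitCount m + 1) m := by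
  intro fuel
  induction fuel using Nat.strong_induction_on with
  | _ fuel ih =>
    intro m hgood hlt
    obtain ⟨k, rfl⟩ : ∃ k, fuel = k + 1 := ⟨fuel - 1, by omega⟩
    rw [pvFB]
    conv_rhs => rw [pvFB]
    rw [show pvMaskBitsB m = pvMaskBits m from rfl]
    by_cases hb : (pvMaskBits m).length ≤ 1
    · rw [if_pos hb, if_pos hb]
    · rw [if_neg hb, if_neg hb]
      have hm0 : 0 ≤ m := by
        rcases hgood with h | h
        · exact h
        · exact absurd h hb
      obtain ⟨hmpos, hpc2⟩ := pv_mask_pos hm0 (by omega)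
      have h1 : (0:Int) ≤ m - 1 := by omega
      have h2 : 0 ≤ PySem.Int.band (m - 1) m := PySem.Int.band_nonneg_of_nonneg_left m h1
      have h3 : PySem.Int.band (PySem.Int.band (m - 1) m) m = PySem.Int.band (m - 1) m :=
        pv_band_idem h1 hm0
      have h4 : PySem.Int.band (m - 1) m ≤ m - 1 := pv_band_le h1 hm0
      have hmem := pv_subs_mem hmpos (m.toNat + 1) (PySem.Int.band (m - 1) m) h2 h3 (by omega)
      have hcands : ∀ x ∈ pvChain m (m.toNat + 1) (PySem.Int.band (m - 1) m),
          (fun s => ((if s ∈ closure then (pvFB closure k s).1 else 0) +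
             (if PySem.Int.bxor m s ∈ closure then (pvFB closure k (PySem.Int.bxor m s)).1 else 0) + 1, s)) x
          = (fun s => ((if s ∈ closure then (pvFB closure (PySem.Int.bitCount m) s).1 else 0) +
             (if PySem.Int.bxor m s ∈ closure then (pvFB closure (PySem.Int.bitCount m) (PySem.Int.bxor m s)).1 else 0) + 1, s)) x := by
        intro x hx
        obtain ⟨hx0, hxne, hxsub, hxlt⟩ := hmem x hx
        have hpcx : PySem.Int.bitCount x < PySem.Int.bitCount m :=
          pvPC_sub_lt hx0 hm0 hxsub (by omega)
        obtain ⟨ho0, hosub, hoz⟩ := pv_bxor_facts hx0 hm0 hxsub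
        have hone : PySem.Int.bxor m x ≠ m := by
          intro hh
          exact hxne ((pv_bxor_eq_self hx0 hm0).mp hh)
        have hpco : PySem.Int.bitCount (PySem.Int.bxor m x) < PySem.Int.bitCount m :=
          pvPC_sub_lt ho0 hm0 hosub hone
        have e1 : pvFB closure k x = pvFB closure (PySem.Int.bitCount m) x := by
          rw [ih k (by omega) x (Or.inl hx0) (by omega),
              ih (PySem.Int.bitCount m) (by omega) x (Or.inl hx0) (by omega)]
        have e2 : pvFB closure k (PySem.Int.bxor m x) = pvFB closure (PySem.Int.bitCount m) (PySem.Int.bxor m x) := by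
          rw [ih k (by omega) _ (Or.inl ho0) (by omega),
              ih (PySem.Int.bitCount m) (by omega) _ (Or.inl ho0) (by omega)]
        simp only [e1, e2]
      simp only [pvSubsB_eq_chain, List.reverse_nil, List.nil_append]
      simp only [List.map_congr_left hcands]

theorem pv_band_pred_ne_zero {m : Int} (hm : 0 < m) (h2 : 2 ≤ PySem.Int.bitCount m) :
    PySem.Int.band (m - 1) m ≠ 0 := by
  obtain ⟨n, rfl⟩ := Int.eq_ofNat_of_zero_le (le_of_lt hm)
  have e1 : ((n:Int) - 1) = ((n - 1 : Nat) : Int) := by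
    have : 0 < n := by exact_mod_cast hm
    omega
  rw [e1, PySem.Int.band_natCast]
  intro hz
  have hz' : (n - 1) &&& n = 0 := by exact_mod_cast hz
  exact pv_land_pred_ne_zero (show 2 ≤ pvBC n from h2)
    (by rw [Nat.and_comm]; exact hz')

-- the candidate cost both programs assign to a submask x of m, written with B's f
def pvCF (closure : PySem.Set Int) (m x : Int) : Int :=
  (if x ∈ closure then (pvFB closure (PySem.Int.bitCount m) x).1 else 0) +
  (if PySem.Int.bxor m x ∈ closure then (pvFB closure (PySem.Int.bitCount m) (PySem.Int.bxor m x)).1 else 0) + 1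

theorem pv_per_mask (closure : PySem.Set Int) (cost : PySem.Dict Int Int) {m : Int}
    (hm0 : 0 ≤ m) (hb : 2 ≤ (pvMaskBits m).length)
    (H : ∀ x, 0 ≤ x → PySem.Int.band x m = x → x ≠ 0 → x ≠ m →
      cost.getD x 0 = (if x ∈ closure then (pvFB closure (PySem.Int.bitCount x + 1) x).1 else 0)) :
    ∃ q : Int × Int,
      pvFB closure (PySem.Int.bitCount m + 1) m = (q.1, some (q.2, PySem.Int.bxor m q.2)) ∧
      pvALoop cost m (m.toNat + 2) m none = some (q.1, (q.2, PySem.Int.bxor m q.2)) := by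
  obtain ⟨hmpos, hpc2⟩ := pv_mask_pos hm0 hb
  have h1 : (0:Int) ≤ m - 1 := by omega
  have h2 : 0 ≤ PySem.Int.band (m - 1) m := PySem.Int.band_nonneg_of_nonneg_left m h1
  have h3 : PySem.Int.band (PySem.Int.band (m - 1) m) m = PySem.Int.band (m - 1) m := pv_band_idem h1 hm0
  have h4 : PySem.Int.band (m - 1) m ≤ m - 1 := pv_band_le h1 hm0
  have hs0ne : PySem.Int.band (m - 1) m ≠ 0 := pv_band_pred_ne_zero hmpos hpc2
  have hsubs : pvChain m (m.toNat + 1) (PySem.Int.band (m - 1) m)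
      = PySem.Int.band (m - 1) m ::
        pvChain m m.toNat (PySem.Int.band (PySem.Int.band (m - 1) m - 1) m) := by
    rw [pvChain, if_neg (by simpa using hs0ne)]
  have hmem := pv_subs_mem hmpos (m.toNat + 1) (PySem.Int.band (m - 1) m) h2 h3 (by omega)
  -- the A-side candidate sums agree with pvCF on every enumerated submask
  have hcA : ∀ x ∈ pvChain m (m.toNat + 1) (PySem.Int.band (m - 1) m),
      cost.getD x 0 + cost.getD (PySem.Int.bxor m x) 0 + 1 = pvCF closure m x := by
    intro x hx
    obtain ⟨hx0, hxne, hxsub, hxlt⟩ := hmem x hx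
    have hpcx : PySem.Int.bitCount x < PySem.Int.bitCount m := pvPC_sub_lt hx0 hm0 hxsub (by omega)
    obtain ⟨ho0, hosub, hoz⟩ := pv_bxor_facts hx0 hm0 hxsub
    have hone : PySem.Int.bxor m x ≠ m := fun hh => hxne ((pv_bxor_eq_self hx0 hm0).mp hh)
    have honz : PySem.Int.bxor m x ≠ 0 := fun hh => (by omega : x ≠ m) (hoz.mp hh)
    have hpco : PySem.Int.bitCount (PySem.Int.bxor m x) < PySem.Int.bitCount m :=
      pvPC_sub_lt ho0 hm0 hosub hone
    rw [H x hx0 hxsub hxne (by omega), H (PySem.Int.bxor m x) ho0 hosub honz hone]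
    unfold pvCF
    rw [pvFB_fuel closure (PySem.Int.bitCount m) x (Or.inl hx0) hpcx,
        pvFB_fuel closure (PySem.Int.bitCount m) (PySem.Int.bxor m x) (Or.inl ho0) hpco]
  refine ⟨List.foldl (fun b pp => if pp.1 < b.1 then pp else b)
      (pvCF closure m (PySem.Int.band (m - 1) m), PySem.Int.band (m - 1) m)
      ((pvChain m m.toNat (PySem.Int.band (PySem.Int.band (m - 1) m - 1) m)).map
        (fun x => (pvCF closure m x, x))), ?_, ?_⟩
  · -- B side
    conv_lhs => rw [pvFB]
    simp only [show pvMaskBitsB m = pvMaskBits m from rfl]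
    rw [if_neg (by omega)]
    simp only [pvSubsB_eq_chain, List.reverse_nil, List.nil_append]
    simp only [hsubs, List.map]
    rfl
  · -- A side
    have hswap : pvChain m (m.toNat + 1 + 1) (PySem.Int.band (m - 1) m)
        = pvChain m (m.toNat + 1) (PySem.Int.band (m - 1) m) :=
      pv_subs_fuel hm0 (PySem.Int.band (m - 1) m).toNat (PySem.Int.band (m - 1) m)
        (m.toNat + 1 + 1) (m.toNat + 1) rfl h2 (by omega) (by omega)
    have hA := pv_aloop_fold cost hmpos (m.toNat + 1) m none hmpos (le_refl m)
      (PySem.Int.band_self m)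
    rw [show m.toNat + 2 = m.toNat + 1 + 1 from rfl] at *
    rw [hA, hswap, hsubs]
    simp only [List.foldl]
    have hhead : pvAU cost m none (PySem.Int.band (m - 1) m)
        = some ((pvCF closure m (PySem.Int.band (m - 1) m), PySem.Int.band (m - 1) m).1,
                ((pvCF closure m (PySem.Int.band (m - 1) m), PySem.Int.band (m - 1) m).2,
                  PySem.Int.bxor m (pvCF closure m (PySem.Int.band (m - 1) m), PySem.Int.band (m - 1) m).2)) := by
      unfold pvAU
      simp only []
      rw [hcA (PySem.Int.band (m - 1) m) (by rw [hsubs]; exact List.mem_cons_self ..)]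
    rw [hhead]
    exact pv_fold_min cost m (pvCF closure m) _ _
      (fun y hy => hcA y (by rw [hsubs]; exact List.mem_cons_of_mem _ hy))

-- ---- the two per-element fold steps ----

def pvAStep (st : PySem.Dict Int Int × PySem.Dict Int (Option (Int × Int))) (m : Int) :
    PySem.Dict Int Int × PySem.Dict Int (Option (Int × Int)) :=
  let bits := pvMaskBits m
  if bits.length ≤ 1 then (st.1.insert m 0, st.2.insert m none)
  else
    match pvALoop st.1 m (m.toNat + 2) m none with
    | some b => (st.1.insert m b.1, st.2.insert m (some b.2))
    | none => (st.1.insert m 0, st.2.insert m none)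

def pvBStep (closure : PySem.Set Int)
    (st : PySem.Dict Int Int × PySem.Dict Int (Option (Int × Int))) (m : Int) :
    PySem.Dict Int Int × PySem.Dict Int (Option (Int × Int)) :=
  let r := pvFB closure (PySem.Int.bitCount m + 1) m
  (st.1.insert m r.1, st.2.insert m r.2)

theorem pv_getD_b (closure : PySem.Set Int) :
    ∀ (done : List Int) (x : Int),
      ((done.foldl (pvBStep closure) (PySem.Dict.empty, PySem.Dict.empty)).1).getD x 0
        = if x ∈ done then (pvFB closure (PySem.Int.bitCount x + 1) x).1 else 0 := by
  intro done
  induction done using List.reverseRecOn with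
  | nil => intro x; simp [PySem.Dict.getD_empty]
  | append_singleton ds d ih =>
    intro x
    rw [List.foldl_append]
    simp only [List.foldl]
    rw [show (pvBStep closure (ds.foldl (pvBStep closure) (PySem.Dict.empty, PySem.Dict.empty)) d).1
        = ((ds.foldl (pvBStep closure) (PySem.Dict.empty, PySem.Dict.empty)).1).insert d
            (pvFB closure (PySem.Int.bitCount d + 1) d).1 from rfl]
    rw [PySem.Dict.getD_insert]
    by_cases hx : x = d
    · subst hx
      rw [if_pos rfl, if_pos (by simp)]
    · rw [if_neg hx, ih x]
      by_cases hmem : x ∈ ds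
      · rw [if_pos hmem, if_pos (by simp [hmem])]
      · rw [if_neg hmem, if_neg (by simp [hmem, hx])]

theorem pvFB_trivial (closure : PySem.Set Int) (fuel : Nat) {m : Int}
    (h : (pvMaskBits m).length ≤ 1) : pvFB closure (fuel + 1) m = (0, none) := by
  rw [pvFB]
  simp only [show pvMaskBitsB m = pvMaskBits m from rfl]
  rw [if_pos h]

theorem pv_fold_eq (masks : List Int) (hPre : Pre_compute_optimal_splits masks) :
    ∀ (rest done : List Int),
      PySem.List.sorted2 masks (fun m => (PySem.Int.bitCount m : Int)) (fun m => m) false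
        = done ++ rest →
      List.foldl pvAStep
        (done.foldl (pvBStep (PySem.Set.ofList masks)) (PySem.Dict.empty, PySem.Dict.empty)) rest
      = List.foldl (pvBStep (PySem.Set.ofList masks))
        (done.foldl (pvBStep (PySem.Set.ofList masks)) (PySem.Dict.empty, PySem.Dict.empty)) rest := by
  intro rest
  induction rest with
  | nil => intro done _; rfl
  | cons m rest ih =>
    intro done horder
    have hm_order : m ∈ PySem.List.sorted2 masks (fun m => (PySem.Int.bitCount m : Int)) (fun m => m) false := by
      rw [horder]; exact List.mem_append_right _ (List.mem_cons_self ..)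
    have hm_masks : m ∈ masks :=
      (PySem.List.sorted2_perm masks (fun m => (PySem.Int.bitCount m : Int)) (fun m => m) false).mem_iff.mp hm_order
    have hstep : pvAStep
        (done.foldl (pvBStep (PySem.Set.ofList masks)) (PySem.Dict.empty, PySem.Dict.empty)) m
        = pvBStep (PySem.Set.ofList masks)
            (done.foldl (pvBStep (PySem.Set.ofList masks)) (PySem.Dict.empty, PySem.Dict.empty)) m := by
      by_cases hbits : (pvMaskBits m).length ≤ 1
      · unfold pvAStep pvBStep
        simp only [if_pos hbits, pvFB_trivial (PySem.Set.ofList masks) (PySem.Int.bitCount m) hbits]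
      · have hm0 : 0 ≤ m := by
          rcases hPre m hm_masks with h | h
          · exact h
          · exfalso; rw [pv_maskbits_len] at hbits; omega
        have H : ∀ x, 0 ≤ x → PySem.Int.band x m = x → x ≠ 0 → x ≠ m →
            ((done.foldl (pvBStep (PySem.Set.ofList masks)) (PySem.Dict.empty, PySem.Dict.empty)).1).getD x 0
            = (if x ∈ PySem.Set.ofList masks then (pvFB (PySem.Set.ofList masks) (PySem.Int.bitCount x + 1) x).1 else 0) := by
          intro x hx0 hxsub hxnz hxnm
          rw [pv_getD_b]
          by_cases hmem : x ∈ PySem.Set.ofList masks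
          · have hx_masks : x ∈ masks := (PySem.Set.mem_ofList masks x).mp hmem
            have hx_order : x ∈ PySem.List.sorted2 masks (fun m => (PySem.Int.bitCount m : Int)) (fun m => m) false :=
              (PySem.List.sorted2_perm masks (fun m => (PySem.Int.bitCount m : Int)) (fun m => m) false).mem_iff.mpr hx_masks
            have hx_done : x ∈ done :=
              pv_mem_prefix (pv_sorted2_pairwise masks) horder hx_order
                (pvPC_sub_lt hx0 hm0 hxsub hxnm)
            rw [if_pos hx_done, if_pos hmem]
          · have hx_ndone : x ∉ done := by
              intro hd
              apply hmem
              apply (PySem.Set.mem_ofList masks x).mpr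
              apply (PySem.List.sorted2_perm masks (fun m => (PySem.Int.bitCount m : Int)) (fun m => m) false).mem_iff.mp
              rw [horder]
              exact List.mem_append_left _ hd
            rw [if_neg hx_ndone, if_neg hmem]
        obtain ⟨q, hB, hA⟩ := pv_per_mask (PySem.Set.ofList masks) _ hm0 (by omega) H
        have hAStep : pvAStep
            (done.foldl (pvBStep (PySem.Set.ofList masks)) (PySem.Dict.empty, PySem.Dict.empty)) m
            = ((done.foldl (pvBStep (PySem.Set.ofList masks)) (PySem.Dict.empty, PySem.Dict.empty)).1.insert m q.1,
               (done.foldl (pvBStep (PySem.Set.ofList masks)) (PySem.Dict.empty, PySem.Dict.empty)).2.insert m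
                 (some (q.2, PySem.Int.bxor m q.2))) := by
          simp only [pvAStep]
          rw [if_neg hbits, hA]
        have hBStep : pvBStep (PySem.Set.ofList masks)
            (done.foldl (pvBStep (PySem.Set.ofList masks)) (PySem.Dict.empty, PySem.Dict.empty)) m
            = ((done.foldl (pvBStep (PySem.Set.ofList masks)) (PySem.Dict.empty, PySem.Dict.empty)).1.insert m q.1,
               (done.foldl (pvBStep (PySem.Set.ofList masks)) (PySem.Dict.empty, PySem.Dict.empty)).2.insert m
                 (some (q.2, PySem.Int.bxor m q.2))) := by
          simp only [pvBStep, hB]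
        rw [hAStep, hBStep]
    calc List.foldl pvAStep
          (done.foldl (pvBStep (PySem.Set.ofList masks)) (PySem.Dict.empty, PySem.Dict.empty)) (m :: rest)
        = List.foldl pvAStep
          ((done ++ [m]).foldl (pvBStep (PySem.Set.ofList masks)) (PySem.Dict.empty, PySem.Dict.empty)) rest := by
          simp only [List.foldl, List.foldl_append, hstep]
      _ = List.foldl (pvBStep (PySem.Set.ofList masks))
          ((done ++ [m]).foldl (pvBStep (PySem.Set.ofList masks)) (PySem.Dict.empty, PySem.Dict.empty)) rest := by
          exact ih (done ++ [m]) (by rw [horder, List.append_assoc]; rfl)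
      _ = List.foldl (pvBStep (PySem.Set.ofList masks))
          (done.foldl (pvBStep (PySem.Set.ofList masks)) (PySem.Dict.empty, PySem.Dict.empty)) (m :: rest) := by
          simp only [List.foldl, List.foldl_append]

-- ===== VERDICT (by name: the statement is the Claim_ definition above) =====
theorem compute_optimal_splits_spec : Claim_equal_compute_optimal_splits := by
  unfold Claim_equal_compute_optimal_splits
  intro masks _ hPre
  unfold Spec_compute_optimal_splits
  have h := pv_fold_eq masks hPre
    (PySem.List.sorted2 masks (fun m => (PySem.Int.bitCount m : Int)) (fun m => m) false) [] rfl
  simp only [List.foldl] at h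
  show compute_optimal_splits masks = compute_optimal_splits_alt masks
  have eA : compute_optimal_splits masks
      = ((List.foldl pvAStep (PySem.Dict.empty, PySem.Dict.empty)
            (PySem.List.sorted2 masks (fun m => (PySem.Int.bitCount m : Int)) (fun m => m) false)).1.items,
         (List.foldl pvAStep (PySem.Dict.empty, PySem.Dict.empty)
            (PySem.List.sorted2 masks (fun m => (PySem.Int.bitCount m : Int)) (fun m => m) false)).2.items) := rfl
  have eB : compute_optimal_splits_alt masks
      = ((List.foldl (pvBStep (PySem.Set.ofList masks)) (PySem.Dict.empty, PySem.Dict.empty)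
            (PySem.List.sorted2 masks (fun m => (PySem.Int.bitCount m : Int)) (fun m => m) false)).1.items,
         (List.foldl (pvBStep (PySem.Set.ofList masks)) (PySem.Dict.empty, PySem.Dict.empty)
            (PySem.List.sorted2 masks (fun m => (PySem.Int.bitCount m : Int)) (fun m => m) false)).2.items) := rfl
  rw [eA, eB, h]
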